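-- pv_equiv track=rewrite | github.com/panchal0691/GFG-Sol | Row with minimum number of 1's.py | minRow
-- ===== SOURCE A (Python) =====
-- def minRow(n,m,a):
--     ans = -1
--     mini = float('inf')
--     for i in range(n):
--         curr = 0
--         for j in range(m):
--             if a[i][j] == 1:
--                 curr += 1
--         if curr < mini:
--             mini = curr
--             ans = i + 1
--     return ans
-- ===== SOURCE B (Python) =====
-- def minRow(n, m, a):
--     def ones(i):
--         return sum(a[i][j] == 1 for j in range(m))
--     order = sorted(range(n), key=ones)
--     return order[0] + 1 if order else -1
-- ===== Notes on version B (the rewrite author's own statement) =====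
-- stated objective: alternative
-- what changed: replaces A's single running-min scan carrying (best index, best count) through nested loops by a sort-based selection: stable-sort the row indices by their 1-count and take the head, relying on sort stability for earliest-wins ties
import Mathlib
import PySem

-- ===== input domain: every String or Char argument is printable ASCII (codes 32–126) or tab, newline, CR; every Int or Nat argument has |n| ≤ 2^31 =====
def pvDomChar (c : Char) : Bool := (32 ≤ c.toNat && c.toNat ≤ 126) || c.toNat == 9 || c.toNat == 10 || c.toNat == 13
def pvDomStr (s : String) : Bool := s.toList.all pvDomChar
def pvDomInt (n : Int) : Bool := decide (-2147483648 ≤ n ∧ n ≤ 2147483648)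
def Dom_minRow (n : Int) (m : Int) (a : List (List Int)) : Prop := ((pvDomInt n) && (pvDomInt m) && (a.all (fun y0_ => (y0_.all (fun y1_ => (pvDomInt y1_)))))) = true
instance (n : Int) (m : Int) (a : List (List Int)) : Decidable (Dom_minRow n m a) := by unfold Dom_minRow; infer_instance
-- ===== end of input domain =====

-- B replaces A's single running-min scan (nested loops carrying best index and best
-- count) by a sort-based selection: stable-sort the row indices by their 1-count and
-- take the head (stability gives the earliest minimal row). Same result, a genuinely
-- different algorithm; not claimed faster.

-- ===== PORT A =====
-- 'mini = float('inf')' is ported as 'none' (no count seen yet): the only use of mini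
-- is the comparison 'curr < mini', which is always true against infinity — exact.
def minRow (n : Int) (m : Int) (a : List (List Int)) : Int :=
  ((PySem.List.pyRange 0 n 1).foldl
    (fun (st : Int × Option Int) i =>
      let curr : Int := (PySem.List.pyRange 0 m 1).foldl
        (fun c j =>
          if PySem.List.pyGetD (PySem.List.pyGetD a i []) j 0 == 1 then c + 1 else c) 0
      match st.2 with
      | none => (i + 1, some curr)
      | some mini => if curr < mini then (i + 1, some curr) else st)
    (-1, none)).1

-- ===== PORT B =====
-- the helper 'ones(i) = sum(a[i][j] == 1 for j in range(m))'
def pvOnes (m : Int) (a : List (List Int)) (i : Int) : Int :=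
  (PySem.List.pyRange 0 m 1).foldl
    (fun c j =>
      c + (if PySem.List.pyGetD (PySem.List.pyGetD a i []) j 0 == 1 then 1 else 0)) 0

-- 'order = sorted(range(n), key=ones); return order[0] + 1 if order else -1'
def minRow_alt (n : Int) (m : Int) (a : List (List Int)) : Int :=
  match PySem.List.sorted (PySem.List.pyRange 0 n 1) (pvOnes m a) false with
  | [] => -1
  | i :: _ => i + 1

-- ===== PRECONDITION & SPEC =====
-- Pre_ excludes exactly the inputs where BOTH programs raise IndexError: with a
-- positive column count m, n exceeding len(a) or m exceeding the length of one of the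
-- first n rows (with m ≤ 0 the inner loop is empty and nothing is ever indexed).
def Pre_minRow (n : Int) (m : Int) (a : List (List Int)) : Prop :=
  0 < m → n ≤ (a.length : Int) ∧ ∀ row ∈ a.take n.toNat, m ≤ (row.length : Int)
instance (n : Int) (m : Int) (a : List (List Int)) : Decidable (Pre_minRow n m a) := by unfold Pre_minRow; infer_instance

def pvWitness_minRow : Int × Int × List (List Int) := (3, 2, [[1, 1], [0, 1], [1, 0]])

def Spec_minRow (n : Int) (m : Int) (a : List (List Int)) (out : Int) : Prop := out = minRow_alt n m a
instance (n : Int) (m : Int) (a : List (List Int)) (out : Int) : Decidable (Spec_minRow n m a out) := by unfold Spec_minRow; infer_instance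

-- ===== CLAIM (what is proved, stated in full; the proofs are below) =====
def Claim_equal_minRow : Prop := ∀ (n : Int) (m : Int) (a : List (List Int)), Dom_minRow n m a → Pre_minRow n m a → Spec_minRow n m a (minRow n m a)

-- ===== LEMMAS AND PROOFS =====

-- 'keep the earlier element unless the new one is strictly smaller under key'
def pvKeep (key : Int → Int) (h x : Int) : Int := if key x < key h then x else h

-- A's inner loop computes pvOnes (the two combinators are pointwise equal).
theorem pv_inner_eq (m : Int) (a : List (List Int)) (i : Int) :
    (PySem.List.pyRange 0 m 1).foldl
      (fun c j =>
        if PySem.List.pyGetD (PySem.List.pyGetD a i []) j 0 == 1 then c + 1 else c) 0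
      = pvOnes m a i := by
  unfold pvOnes
  congr 1
  funext c j
  split <;> ring

-- A's outer loop after the first row tracks (b + 1, some (key b)) where b is the
-- running first-strict-argmin.
theorem pv_foldA (key : Int → Int) (t : List Int) :
    ∀ b : Int,
      t.foldl
        (fun (st : Int × Option Int) i =>
          match st.2 with
          | none => (i + 1, some (key i))
          | some mini => if key i < mini then (i + 1, some (key i)) else st)
        (b + 1, some (key b))
      = ((t.foldl (pvKeep key) b) + 1, some (key (t.foldl (pvKeep key) b))) := by
  induction t with
  | nil => intro b; rfl
  | cons x t ih =>
    intro b
    simp only [List.foldl_cons]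
    by_cases h : key x < key b
    · rw [show (pvKeep key b x) = x from by simp [pvKeep, h]]
      simpa [h] using ih x
    · rw [show (pvKeep key b x) = b from by simp [pvKeep, h]]
      simpa [h] using ih b

-- Head of the insertion-sort accumulator: inserting x changes the head only when
-- key x is strictly below the head's key (insertBy walks past equal keys).
theorem pv_foldB (key : Int → Int) (t : List Int) :
    ∀ (h : Int) (acc : List Int), ∃ acc',
      t.foldl
        (fun acc x => PySem.List.insertBy (fun a b => decide (key a < key b)) x acc)
        (h :: acc)
      = (t.foldl (pvKeep key) h) :: acc' := by
  induction t with
  | nil => intro h acc; exact ⟨acc, rfl⟩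
  | cons x t ih =>
    intro h acc
    simp only [List.foldl_cons]
    by_cases hx : key x < key h
    · have : PySem.List.insertBy (fun a b => decide (key a < key b)) x (h :: acc)
          = x :: h :: acc := by simp [PySem.List.insertBy, hx]
      rw [this, show (pvKeep key h x) = x from by simp [pvKeep, hx]]
      exact ih x (h :: acc)
    · have : PySem.List.insertBy (fun a b => decide (key a < key b)) x (h :: acc)
          = h :: PySem.List.insertBy (fun a b => decide (key a < key b)) x acc := by
        simp [PySem.List.insertBy, hx]
      rw [this, show (pvKeep key h x) = h from by simp [pvKeep, hx]]
      exact ih h _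

theorem pv_main (n m : Int) (a : List (List Int)) :
    minRow n m a = minRow_alt n m a := by
  set key : Int → Int := pvOnes m a with hkey
  by_cases hn : n ≤ 0
  · have hnil : PySem.List.pyRange 0 n 1 = [] := PySem.List.pyRange_one_eq_nil hn
    simp [minRow, minRow_alt, hnil, PySem.List.sorted]
  · have hcons : PySem.List.pyRange 0 n 1 = 0 :: PySem.List.pyRange 1 n 1 :=
      PySem.List.pyRange_one_cons (by omega)
    set t := PySem.List.pyRange 1 n 1 with ht
    -- A side
    have hA : minRow n m a = (t.foldl (pvKeep key) 0) + 1 := by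
      unfold minRow
      have hfun : (fun (st : Int × Option Int) i =>
          let curr : Int := (PySem.List.pyRange 0 m 1).foldl
            (fun c j =>
              if PySem.List.pyGetD (PySem.List.pyGetD a i []) j 0 == 1 then c + 1 else c) 0
          match st.2 with
          | none => (i + 1, some curr)
          | some mini => if curr < mini then (i + 1, some curr) else st)
          = (fun (st : Int × Option Int) i =>
              match st.2 with
              | none => (i + 1, some (key i))
              | some mini => if key i < mini then (i + 1, some (key i)) else st) := by
        funext st i
        simp only [pv_inner_eq m a i, hkey]
      rw [hfun, hcons, List.foldl_cons]
      change (t.foldl _ ((0 : Int) + 1, some (key 0))).1 = _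
      rw [pv_foldA key t 0]
    -- B side
    have hB : minRow_alt n m a = (t.foldl (pvKeep key) 0) + 1 := by
      unfold minRow_alt
      rw [PySem.List.sorted_eq_foldl_insertBy, hcons, List.foldl_cons]
      have h0 : PySem.List.insertBy (fun x y => decide (key x < key y)) 0 ([] : List Int)
          = [0] := rfl
      rw [h0]
      obtain ⟨acc', hacc⟩ := pv_foldB key t 0 []
      rw [hacc]
    rw [hA, hB]

-- ===== VERDICT (by name: the statement is the Claim_ definition above) =====
theorem minRow_spec : Claim_equal_minRow := by
  intro n m a _ _
  exact pv_main n m a
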